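-- pv_equiv track=rewrite | github.com/JakeJing/estnltk | estnltk/mw_verbs/utils.py | getClausesByClauseIDs
-- ===== SOURCE A (Python) =====
-- def getClausesByClauseIDs(jsonSent):
--     clauses   = dict()
--     for tokenStruct in jsonSent:
--         assert 'clauseID' in tokenStruct, ' clauseID not found in: '+str(tokenStruct)
--     clauseIDs = [tokenStruct["clauseID"] for tokenStruct in jsonSent]
--     for i in range(len(jsonSent)):
--         tokenJson = jsonSent[i]
--         clauseId  = tokenJson["clauseID"]
--         if clauseId not in clauses:
--             clauses[clauseId] = []
--         clauses[clauseId].append( tokenJson )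
--     return clauses
-- ===== SOURCE B (Python) =====
-- def getClausesByClauseIDs(jsonSent):
--     for tokenStruct in jsonSent:
--         assert 'clauseID' in tokenStruct, ' clauseID not found in: '+str(tokenStruct)
--     ids = list(dict.fromkeys(t['clauseID'] for t in jsonSent))
--     return {cid: [t for t in jsonSent if t['clauseID'] == cid] for cid in ids}
-- ===== Notes on version B (the rewrite author's own statement) =====
-- stated objective: simpler
-- what changed: Instead of growing a dict token by token with an in-place append per token, B first deduplicates the clauseIDs in first-seen order (dict.fromkeys) and then builds the result in one dict comprehension whose value for each id is a filter over the sentence.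
import Mathlib
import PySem

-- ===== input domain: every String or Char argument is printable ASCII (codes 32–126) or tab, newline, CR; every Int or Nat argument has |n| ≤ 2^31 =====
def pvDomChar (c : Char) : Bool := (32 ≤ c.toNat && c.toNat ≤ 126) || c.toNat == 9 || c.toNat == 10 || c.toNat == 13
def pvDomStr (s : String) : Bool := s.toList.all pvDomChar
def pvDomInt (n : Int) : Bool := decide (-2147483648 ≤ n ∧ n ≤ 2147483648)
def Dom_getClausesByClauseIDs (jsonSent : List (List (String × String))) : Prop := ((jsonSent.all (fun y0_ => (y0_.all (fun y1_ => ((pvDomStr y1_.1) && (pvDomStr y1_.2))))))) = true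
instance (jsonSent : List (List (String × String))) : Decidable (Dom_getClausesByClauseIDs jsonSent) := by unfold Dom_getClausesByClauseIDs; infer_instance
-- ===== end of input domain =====

-- B groups the tokens by clauseID via an ordered dedup of the ids plus one filter per id,
-- instead of A's incremental dict-building loop; same return value, simpler shape (objective: simpler, not faster).

-- shared helper: both Pythons evaluate tokenStruct['clauseID'] (first-match lookup; the
-- default "" is never reached under Pre_, which guarantees the key is present)
def pvCid (t : List (String × String)) : String := (PySem.Dict.mk t).getD "clauseID" ""

-- ===== PORT A =====
-- the assert loop raises outside Pre_; on Pre_ it is a no-op, so the port is the returning path.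
def getClausesByClauseIDs (jsonSent : List (List (String × String))) : List (String × List (List (String × String))) :=
  let _clauseIDs := jsonSent.map (fun tokenStruct => pvCid tokenStruct)
  (jsonSent.foldl
    (fun (clauses : PySem.Dict String (List (List (String × String)))) tokenJson =>
      let clauseId := pvCid tokenJson
      let clauses := if clauses.contains clauseId then clauses else clauses.insert clauseId []
      clauses.modify clauseId [] (fun l => l ++ [tokenJson]))
    PySem.Dict.empty).items

-- ===== PORT B =====
def getClausesByClauseIDs_alt (jsonSent : List (List (String × String))) : List (String × List (List (String × String))) :=
  let ids := PySem.List.dedup (jsonSent.map (fun t => pvCid t))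
  ids.map (fun cid => (cid, jsonSent.filter (fun t => pvCid t == cid)))

-- ===== PRECONDITION & SPEC =====
-- Pre_ excludes exactly the inputs where a token lacks the 'clauseID' key: there A's assert raises AssertionError (and B's does too).
def Pre_getClausesByClauseIDs (jsonSent : List (List (String × String))) : Prop :=
  ∀ t ∈ jsonSent, "clauseID" ∈ t.map Prod.fst
instance (jsonSent : List (List (String × String))) : Decidable (Pre_getClausesByClauseIDs jsonSent) := by unfold Pre_getClausesByClauseIDs; infer_instance
def pvWitness_getClausesByClauseIDs : (List (List (String × String))) :=
  [[("clauseID", "1"), ("word", "Tere")], [("clauseID", "2"), ("word", "!")], [("clauseID", "1")]]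
def Spec_getClausesByClauseIDs (jsonSent : List (List (String × String))) (out : List (String × List (List (String × String)))) : Prop := out = getClausesByClauseIDs_alt jsonSent
instance (jsonSent : List (List (String × String))) (out : List (String × List (List (String × String)))) : Decidable (Spec_getClausesByClauseIDs jsonSent out) := by unfold Spec_getClausesByClauseIDs; infer_instance

-- ===== CLAIM (what is proved, stated in full; the proofs are below) =====
def Claim_equal_getClausesByClauseIDs : Prop := ∀ (jsonSent : List (List (String × String))), Dom_getClausesByClauseIDs jsonSent → Pre_getClausesByClauseIDs jsonSent → Spec_getClausesByClauseIDs jsonSent (getClausesByClauseIDs jsonSent)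

-- ===== LEMMAS AND PROOFS =====

-- the loop body of A, named for the proofs
def pvStep (clauses : PySem.Dict String (List (List (String × String)))) (tokenJson : List (String × String)) : PySem.Dict String (List (List (String × String))) :=
  (if clauses.contains (pvCid tokenJson) then clauses else clauses.insert (pvCid tokenJson) []).modify
    (pvCid tokenJson) [] (fun l => l ++ [tokenJson])

theorem pvA_eq_foldl (jsonSent : List (List (String × String))) :
    getClausesByClauseIDs jsonSent = (jsonSent.foldl pvStep PySem.Dict.empty).items := rfl

theorem pvStep_getD (d : PySem.Dict String (List (List (String × String)))) (t : List (String × String)) (c : String) :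
    (pvStep d t).getD c [] = d.getD c [] ++ (if pvCid t == c then [t] else []) := by
  unfold pvStep
  by_cases h : d.contains (pvCid t) = true
  · rw [if_pos h, PySem.Dict.getD_modify]
    by_cases hc : c = pvCid t
    · subst hc; simp
    · simp [hc, beq_iff_eq, Ne.symm hc]
  · rw [if_neg h, PySem.Dict.getD_modify]
    by_cases hc : c = pvCid t
    · subst hc
      rw [if_pos rfl, PySem.Dict.getD_insert_self,
        PySem.Dict.getD_of_not_contains d _ (eq_false_of_ne_true h)]
      simp
    · rw [if_neg hc, PySem.Dict.getD_insert_of_ne _ _ _ hc]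
      simp [beq_iff_eq, Ne.symm hc]

theorem pvFoldl_getD (l : List (List (String × String))) (c : String) :
    ∀ d, (l.foldl pvStep d).getD c [] = d.getD c [] ++ l.filter (fun t => pvCid t == c) := by
  induction l with
  | nil => intro d; simp
  | cons t l ih =>
      intro d
      rw [List.foldl_cons, ih, pvStep_getD, List.filter_cons]
      by_cases hc : (pvCid t == c) = true
      · simp [hc]
      · simp [hc]

theorem pvStep_keys (d : PySem.Dict String (List (List (String × String)))) (t : List (String × String)) :
    (pvStep d t).keys = PySem.Set.add d.keys (pvCid t) := by
  unfold pvStep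
  by_cases h : d.contains (pvCid t) = true
  · rw [if_pos h, PySem.Dict.keys_modify, PySem.Dict.keys_insert_of_contains _ _ h]
    exact (PySem.Set.add_of_mem ((PySem.Dict.contains_iff_mem_keys d _).mp h)).symm
  · rw [if_neg h, PySem.Dict.keys_modify,
      PySem.Dict.keys_insert_of_contains _ _ (PySem.Dict.contains_insert_self d _ _),
      PySem.Dict.keys_insert_of_not_contains d _ (eq_false_of_ne_true h)]
    exact (PySem.Set.add_of_not_mem (fun hm => h ((PySem.Dict.contains_iff_mem_keys d _).mpr hm))).symm

theorem pvFoldl_keys (l : List (List (String × String))) :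
    ∀ d : PySem.Dict String (List (List (String × String))),
      (l.foldl pvStep d).keys = PySem.Set.update d.keys (l.map pvCid) := by
  induction l with
  | nil => intro d; simp [PySem.Set.update_nil]
  | cons t l ih =>
      intro d
      rw [List.foldl_cons, ih, List.map_cons, PySem.Set.update_cons, pvStep_keys]

-- ===== VERDICT (by name: the statement is the Claim_ definition above) =====
theorem getClausesByClauseIDs_spec : Claim_equal_getClausesByClauseIDs := by
  intro jsonSent _ _
  unfold Spec_getClausesByClauseIDs getClausesByClauseIDs_alt
  rw [pvA_eq_foldl]
  have hkeys : (jsonSent.foldl pvStep PySem.Dict.empty).keys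
      = PySem.Set.ofList (jsonSent.map pvCid) := by
    rw [pvFoldl_keys]
    simp [PySem.Set.update_nil_left]
  have hnd : (jsonSent.foldl pvStep PySem.Dict.empty).keys.Nodup := by
    rw [hkeys]; exact PySem.Set.nodup_ofList _
  rw [PySem.Dict.items_eq_map_keys _ hnd ([] : List (List (String × String))), hkeys,
    PySem.List.dedup_eq_ofList]
  refine List.map_congr_left (fun c _ => ?_)
  rw [pvFoldl_getD]
  simp
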